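-- pv_equiv track=rewrite | github.com/diegomrodrigues2/algo_ds_challenges | algorithms/backtracking/graph_coloring.py | graph_coloring_all_solutions
-- ===== SOURCE A (Python) =====
-- from typing import List, Optional, Dict, Tuple
--
-- def graph_coloring_all_solutions(graph: List[List[int]], m: int) -> List[List[int]]:
--     """
--     Encontra todas as soluções para o problema de coloração.
--
--     Args:
--         graph: Matriz de adjacência do grafo (V x V)
--         m: Número máximo de cores disponíveis
--
--     Returns:
--         Lista de todas as soluções válidas
--     """
--     if not graph or m <= 0:
--         return []
--
--     V = len(graph)
--     if V == 0:
--         return [[]]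
--
--     colors = [0] * V
--     solutions = []
--
--     def is_safe(vertex: int, color: int) -> bool:
--         for i in range(V):
--             if graph[vertex][i] == 1 and colors[i] == color:
--                 return False
--         return True
--
--     def find_all_solutions_util(vertex: int) -> None:
--         if vertex == V:
--             solutions.append(colors.copy())
--             return
--
--         for color in range(1, m + 1):
--             if is_safe(vertex, color):
--                 colors[vertex] = color
--                 find_all_solutions_util(vertex + 1)
--                 colors[vertex] = 0
--
--     find_all_solutions_util(0)
--     return solutions
-- ===== SOURCE B (Python) =====
-- def _prod(m, n):
--     # all tuples of length n over 1..m, in lexicographic order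
--     if n == 0:
--         return [[]]
--     rest = _prod(m, n - 1)
--     return [[c] + t for c in range(1, m + 1) for t in rest]
--
-- def _valid(graph, colors):
--     # mirror is_safe: vertex u is only ever compared against lower-indexed
--     # vertices, through row u of the (possibly non-symmetric) matrix
--     return all(colors[u] != colors[v]
--                for u in range(len(graph)) for v in range(u)
--                if graph[u][v] == 1)
--
-- def graph_coloring_all_solutions(graph, m):
--     if not graph or m <= 0:
--         return []
--     return [cand for cand in _prod(m, len(graph)) if _valid(graph, cand)]
-- ===== Notes on version B (the rewrite author's own statement) =====
-- stated objective: idiomatic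
-- what changed: Replaces the mutating backtracker (recursive search over a shared colors array with is_safe pruning) by generate-and-test: enumerate all m^V candidate colorings in lexicographic order and keep those with no monochromatic edge in the lower triangle of the adjacency rows.
-- outside the precondition, e.g. on graph_coloring_all_solutions([[0, 1], [1]], 1): A returns [], B returns []
import Mathlib
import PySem

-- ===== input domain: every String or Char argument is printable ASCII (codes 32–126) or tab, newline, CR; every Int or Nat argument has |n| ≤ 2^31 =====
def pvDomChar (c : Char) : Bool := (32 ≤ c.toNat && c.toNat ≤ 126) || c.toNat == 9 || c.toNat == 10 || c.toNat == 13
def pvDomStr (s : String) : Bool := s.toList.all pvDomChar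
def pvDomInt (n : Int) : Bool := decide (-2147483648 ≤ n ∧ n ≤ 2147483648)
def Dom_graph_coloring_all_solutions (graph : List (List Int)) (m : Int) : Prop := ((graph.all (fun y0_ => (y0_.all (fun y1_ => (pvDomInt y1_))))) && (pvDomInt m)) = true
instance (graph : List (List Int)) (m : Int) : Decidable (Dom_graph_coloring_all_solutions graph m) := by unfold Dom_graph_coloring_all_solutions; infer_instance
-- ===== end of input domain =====

-- B replaces the mutating backtracking search by generate-and-test over all m^V candidate
-- colorings (same lexicographic order, same lower-triangle edge test); objective: idiomatic.


-- ===== PORT A =====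
-- is_safe(vertex, color): scans ALL i in range(V) of row `vertex` (indexing is total via
-- getD; Pre_ excludes the ragged rows on which the Python raises IndexError)
def pyIsSafe (graph : List (List Int)) (V : Nat) (colors : List Int) (vertex : Nat) (color : Int) : Bool :=
  (List.range V).all fun i =>
    !((graph.getD vertex []).getD i 0 == 1 && colors.getD i 0 == color)

-- find_all_solutions_util: the mutation colors[vertex] = color / reset-to-0 becomes passing
-- the updated list; the `vertex == V` base case is written `V ≤ vertex` only for totality
-- (callers increment from 0, so vertex never exceeds V).
def pyUtil (graph : List (List Int)) (V : Nat) (m : Int) (vertex : Nat) (colors : List Int) : List (List Int) :=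
  if V ≤ vertex then [colors]
  else
    (PySem.List.pyRange 1 (m + 1) 1).foldl
      (fun acc color =>
        if pyIsSafe graph V colors vertex color then
          acc ++ pyUtil graph V m (vertex + 1) (colors.set vertex color)
        else acc)
      []
termination_by V - vertex
decreasing_by omega

def graph_coloring_all_solutions (graph : List (List Int)) (m : Int) : List (List Int) :=
  if graph = [] ∨ m ≤ 0 then []
  else
    let V := graph.length
    if V = 0 then [[]]   -- dead code in the Python too (graph ≠ [] here); kept literally
    else pyUtil graph V m 0 (List.replicate V 0)

-- ===== PORT B =====
-- _prod(m, n): all length-n tuples over 1..m, lexicographic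
def altProd (m : Int) : Nat → List (List Int)
  | 0 => [[]]
  | n + 1 => (PySem.List.pyRange 1 (m + 1) 1).flatMap fun c => (altProd m n).map (c :: ·)

-- _valid(graph, colors): no edge (u, v) with v < u, graph[u][v] == 1, equal colors
def altValid (graph : List (List Int)) (colors : List Int) : Bool :=
  (List.range graph.length).all fun u => (List.range u).all fun v =>
    !((graph.getD u []).getD v 0 == 1 && colors.getD u 0 == colors.getD v 0)

def graph_coloring_all_solutions_alt (graph : List (List Int)) (m : Int) : List (List Int) :=
  if graph = [] ∨ m ≤ 0 then []
  else (altProd m graph.length).filter (fun cand => altValid graph cand)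

-- ===== PRECONDITION & SPEC =====
-- Pre_ excludes ragged adjacency matrices (some row shorter than the vertex count) when a
-- search actually runs (m > 0): there the Python A generally raises IndexError (on a few such
-- inputs the search prunes before reaching the missing entry and A still returns; those are
-- excluded with it).
def Pre_graph_coloring_all_solutions (graph : List (List Int)) (m : Int) : Prop :=
  m ≤ 0 ∨ ∀ row ∈ graph, graph.length ≤ row.length
instance (graph : List (List Int)) (m : Int) : Decidable (Pre_graph_coloring_all_solutions graph m) := by
  unfold Pre_graph_coloring_all_solutions; infer_instance
def pvWitness_graph_coloring_all_solutions : List (List Int) × Int := ([[0, 1], [1, 0]], 2)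

def Spec_graph_coloring_all_solutions (graph : List (List Int)) (m : Int) (out : List (List Int)) : Prop := out = graph_coloring_all_solutions_alt graph m
instance (graph : List (List Int)) (m : Int) (out : List (List Int)) : Decidable (Spec_graph_coloring_all_solutions graph m out) := by unfold Spec_graph_coloring_all_solutions; infer_instance

-- ===== CLAIM (what is proved, stated in full; the proofs are below) =====
def Claim_equal_graph_coloring_all_solutions : Prop := ∀ (graph : List (List Int)) (m : Int), Dom_graph_coloring_all_solutions graph m → Pre_graph_coloring_all_solutions graph m → Spec_graph_coloring_all_solutions graph m (graph_coloring_all_solutions graph m)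

-- ===== LEMMAS AND PROOFS =====

-- the safety test A performs at step `vertex = p.length`, phrased on the prefix alone
def safeB (graph : List (List Int)) (p : List Int) (c : Int) : Bool :=
  (List.range p.length).all fun v =>
    !((graph.getD p.length []).getD v 0 == 1 && p.getD v 0 == c)

-- validity of a suffix of colors, extending an already-placed prefix p
def suffOK (graph : List (List Int)) : List Int → List Int → Bool
  | _, [] => true
  | p, c :: rest => safeB graph p c && suffOK graph (p ++ [c]) rest

theorem all_congr_mem {α : Type} {l : List α} {p q : α → Bool}
    (h : ∀ x ∈ l, p x = q x) : l.all p = l.all q := by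
  induction l with
  | nil => rfl
  | cons a t ih =>
    simp only [List.all_cons, h a (List.mem_cons_self), ih fun x hx => h x (List.mem_cons_of_mem a hx)]

theorem flatMap_if_eq_filter_flatMap {α β : Type} (l : List α) (p : α → Bool) (g : α → List β) :
    l.flatMap (fun c => if p c then g c else []) = (l.filter p).flatMap g := by
  induction l with
  | nil => rfl
  | cons a t ih => by_cases h : p a <;> simp [h, ih]

-- during the search, unplaced vertices hold color 0 and candidate colors are ≥ 1,
-- so A's full-row scan agrees with the prefix-only test
theorem pyIsSafe_eq_safeB (graph : List (List Int)) (V : Nat) (p : List Int) (k : Nat)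
    (c : Int) (hV : p.length + k = V) (hc : 1 ≤ c) :
    pyIsSafe graph V (p ++ List.replicate k 0) p.length c = safeB graph p c := by
  unfold pyIsSafe safeB
  subst hV
  rw [List.range_add, List.all_append, List.all_map]
  have h2 : (List.range k).all
      ((fun i => !((graph.getD p.length []).getD i 0 == 1 &&
        (p ++ List.replicate k 0).getD i 0 == c)) ∘ (p.length + ·)) = true := by
    simp only [List.all_eq_true, Function.comp]
    intro i hi
    have : (p ++ List.replicate k (0:Int)).getD (p.length + i) 0 = 0 := by
      simp [List.getD, List.mem_range.mp hi]
    rw [this]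
    simp only [Bool.not_eq_eq_eq_not, Bool.not_true, Bool.and_eq_false_imp, beq_iff_eq]
    intro _; simp; omega
  rw [h2, Bool.and_true]
  apply all_congr_mem
  intro v hv
  congr 1
  rw [List.getD_append _ _ _ _ (List.mem_range.mp hv)]

theorem set_append_replicate (p : List Int) (k : Nat) (c : Int) :
    (p ++ List.replicate (k + 1) (0:Int)).set p.length c = (p ++ [c]) ++ List.replicate k 0 := by
  rw [List.set_append_right _ _ (le_refl _)]
  simp [List.replicate_succ]

-- the backtracker from vertex = p.length equals filter-then-extend over all suffixes
theorem pyUtil_eq_filter (graph : List (List Int)) (m : Int) (V : Nat) :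
    ∀ (k : Nat) (p : List Int), p.length + k = V → (∀ c ∈ p, 1 ≤ c) →
    pyUtil graph V m p.length (p ++ List.replicate k 0)
      = ((altProd m k).filter (fun suf => suffOK graph p suf)).map (fun suf => p ++ suf) := by
  intro k
  induction k with
  | zero =>
    intro p hV _
    rw [pyUtil, if_pos (by omega)]
    simp [altProd, suffOK]
  | succ k ih =>
    intro p hV hp
    rw [pyUtil]
    rw [if_neg (by omega)]
    rw [PySem.List.foldl_if_eq_foldl_filter, PySem.List.foldl_append_eq_flatMap, List.nil_append]
    rw [← flatMap_if_eq_filter_flatMap]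
    -- right-hand side
    conv_rhs => rw [altProd, List.filter_flatMap, List.map_flatMap]
    apply List.flatMap_congr
    intro c hc
    have hc1 : 1 ≤ c := ((PySem.List.mem_pyRange_one).mp hc).1
    rw [pyIsSafe_eq_safeB graph V p (k+1) c hV hc1]
    have hfm : (List.filter (fun suf => suffOK graph p suf) ((altProd m k).map (c :: ·))) =
        ((altProd m k).filter (fun rest => suffOK graph p (c :: rest))).map (c :: ·) := by
      rw [List.filter_map]; rfl
    rw [hfm]
    by_cases h : safeB graph p c
    · rw [if_pos h, set_append_replicate]
      have hIH := ih (p ++ [c]) (by simp; omega)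
        (by intro x hx; rcases List.mem_append.mp hx with h' | h'
            · exact hp x h'
            · simp at h'; omega)
      simp only [List.length_append, List.length_cons, List.length_nil, Nat.zero_add] at hIH
      rw [hIH]
      simp only [List.map_map]
      congr 1
      · funext rest
        simp [Function.comp]
      · apply List.filter_congr
        intro rest _
        show suffOK graph (p ++ [c]) rest = suffOK graph p (c :: rest)
        simp [suffOK, h]
    · rw [if_neg h]
      have : (altProd m k).filter (fun rest => suffOK graph p (c :: rest)) = [] := by
        apply List.filter_eq_nil_iff.mpr
        intro rest _
        simp [suffOK, h]
      rw [this]; rfl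

-- every candidate coloring has length n
theorem altProd_length (m : Int) (n : Nat) : ∀ suf ∈ altProd m n, suf.length = n := by
  induction n with
  | zero => intro suf h; simp [altProd] at h; simp [h]
  | succ n ih =>
    intro suf h
    simp only [altProd, List.mem_flatMap, List.mem_map] at h
    obtain ⟨c, -, rest, hr, rfl⟩ := h
    simp [ih rest hr]

-- the chained safety test on the empty prefix is exactly B's pairwise validity test
theorem suffOK_eq_range (graph : List (List Int)) :
    ∀ (suf p : List Int), suffOK graph p suf =
      (List.range suf.length).all fun j => safeB graph (p ++ suf.take j) (suf.getD j 0) := by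
  intro suf
  induction suf with
  | nil => intro p; rfl
  | cons c rest ih =>
    intro p
    simp only [suffOK]
    rw [List.length_cons, List.range_succ_eq_map, List.all_cons, List.all_map]
    congr 1
    · simp [List.getD]
    · rw [ih (p ++ [c])]
      apply all_congr_mem
      intro j _
      simp [Function.comp, List.take_succ_cons, List.append_assoc]

theorem suffOK_nil_eq_altValid (graph : List (List Int)) (suf : List Int)
    (hlen : suf.length = graph.length) :
    suffOK graph [] suf = altValid graph suf := by
  rw [suffOK_eq_range, altValid, ← hlen]
  apply all_congr_mem
  intro j hj
  have hj' : j < suf.length := List.mem_range.mp hj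
  unfold safeB
  rw [List.nil_append, List.length_take_of_le (le_of_lt hj')]
  apply all_congr_mem
  intro v hv
  have hv' : v < j := List.mem_range.mp hv
  have h1 : (List.take j suf).getD v 0 = suf.getD v 0 := by
    simp [List.getD, List.getElem?_take_of_lt hv']
  rw [h1]
  have h2 : (suf.getD v 0 == suf.getD j 0) = (suf.getD j 0 == suf.getD v 0) := Bool.beq_comm
  rw [h2]

-- ===== VERDICT (by name: the statement is the Claim_ definition above) =====
theorem graph_coloring_all_solutions_spec : Claim_equal_graph_coloring_all_solutions := by
  intro graph m _ _
  unfold Spec_graph_coloring_all_solutions graph_coloring_all_solutions graph_coloring_all_solutions_alt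
  by_cases h : graph = [] ∨ m ≤ 0
  · simp [h]
  · rw [if_neg h, if_neg h]
    have hne : graph ≠ [] := fun hg => h (Or.inl hg)
    have hV : graph.length ≠ 0 := fun h0 => hne (List.length_eq_zero_iff.mp h0)
    rw [if_neg hV]
    have := pyUtil_eq_filter graph m graph.length graph.length []
      (by simp) (by intro c hc; simp at hc)
    simp only [List.nil_append, List.length_nil, List.map_id'] at this
    rw [this]
    rw [List.filter_congr (fun suf hs =>
      suffOK_nil_eq_altValid graph suf (altProd_length m graph.length suf hs))]
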